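-- pv_equiv track=rewrite | github.com/arthurcgusmao/asteroidea | asteroidea/structure_gen.py | generate_vars_combinations
-- ===== SOURCE A (Python) =====
-- import itertools
--
-- def generate_vars_combinations(vars):
--     """Vars should be a list of variables"""
--     combs = []
--     for r in range(1, 4):
--         combs.extend(itertools.combinations(vars, r))
--     output = []
--     for comb in combs:
--         output.append(list(comb))
--     return output
-- ===== SOURCE B (Python) =====
-- def _pairs(xs):
--     out = []
--     while xs:
--         x, xs = xs[0], xs[1:]
--         out += [[x, y] for y in xs]
--     return out
--
-- def _triples(xs):
--     out = []
--     while xs: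
--         x, xs = xs[0], xs[1:]
--         out += [[x] + p for p in _pairs(xs)]
--     return out
--
-- def generate_vars_combinations(items):
--     """Vars should be a list of variables"""
--     return [[x] for x in items] + _pairs(items) + _triples(items)
-- ===== Notes on version B (the rewrite author's own statement) =====
-- stated objective: simpler
-- what changed: Replaces the generic itertools.combinations calls (plus the tuple-to-list rewriting pass) with three specialized size-1/2/3 builders that walk the list's suffixes directly and emit lists in the same lexicographic order.
import Mathlib
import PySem

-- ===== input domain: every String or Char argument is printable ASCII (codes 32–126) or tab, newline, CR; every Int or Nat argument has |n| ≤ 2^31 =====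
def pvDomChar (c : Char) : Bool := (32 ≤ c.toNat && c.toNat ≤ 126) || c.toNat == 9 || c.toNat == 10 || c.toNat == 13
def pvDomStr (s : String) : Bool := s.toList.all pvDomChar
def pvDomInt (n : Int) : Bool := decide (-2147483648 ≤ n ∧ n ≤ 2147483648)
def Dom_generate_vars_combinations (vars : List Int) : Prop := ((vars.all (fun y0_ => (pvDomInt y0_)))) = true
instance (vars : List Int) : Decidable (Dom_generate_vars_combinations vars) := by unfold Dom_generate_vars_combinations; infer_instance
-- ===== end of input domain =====

-- B replaces itertools.combinations(vars, r) for r=1..3 (and the tuple-to-list pass)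
-- with three specialized builders recursing on the list's suffixes, same output order.
-- ===== PORT A =====
-- itertools.combinations(vars, r) in lexicographic index order:
def pvCombA : Nat → List Int → List (List Int)
  | 0, _ => [[]]
  | _ + 1, [] => []
  | r + 1, x :: xs => (pvCombA r xs).map (fun c => x :: c) ++ pvCombA (r + 1) xs

def generate_vars_combinations (vars : List Int) : List (List Int) :=
  -- combs = []; for r in range(1, 4): combs.extend(itertools.combinations(vars, r))
  let combs := (PySem.List.pyRange 1 4 1).foldl (fun acc r => acc ++ pvCombA r.toNat vars) []
  -- output = []; for comb in combs: output.append(list(comb))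
  combs.foldl (fun out comb => out ++ [comb]) []

-- ===== PORT B =====
def pvPairsB : List Int → List (List Int)
  | [] => []
  | x :: xs => xs.map (fun y => [x, y]) ++ pvPairsB xs

def pvTriplesB : List Int → List (List Int)
  | [] => []
  | x :: xs => (pvPairsB xs).map (fun p => x :: p) ++ pvTriplesB xs

def generate_vars_combinations_alt (vars : List Int) : List (List Int) :=
  vars.map (fun x => [x]) ++ pvPairsB vars ++ pvTriplesB vars

-- ===== PRECONDITION & SPEC =====
def Spec_generate_vars_combinations (vars : List Int) (out : List (List Int)) : Prop := out = generate_vars_combinations_alt vars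
instance (vars : List Int) (out : List (List Int)) : Decidable (Spec_generate_vars_combinations vars out) := by unfold Spec_generate_vars_combinations; infer_instance

-- ===== CLAIM (what is proved, stated in full; the proofs are below) =====
def Claim_equal_generate_vars_combinations : Prop := ∀ (vars : List Int), Dom_generate_vars_combinations vars → Spec_generate_vars_combinations vars (generate_vars_combinations vars)

-- ===== LEMMAS AND PROOFS =====

lemma pvCombA_one (xs : List Int) : pvCombA 1 xs = xs.map (fun x => [x]) := by
  induction xs with
  | nil => rfl
  | cons x xs ih => simp [pvCombA, ih]

lemma pvCombA_two (xs : List Int) : pvCombA 2 xs = pvPairsB xs := by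
  induction xs with
  | nil => rfl
  | cons x xs ih => simp [pvCombA, pvPairsB, ih, pvCombA_one, List.map_map, Function.comp]

lemma pvCombA_three (xs : List Int) : pvCombA 3 xs = pvTriplesB xs := by
  induction xs with
  | nil => rfl
  | cons x xs ih => simp [pvCombA, pvTriplesB, ih, pvCombA_two]

lemma foldl_append_singleton (l : List (List Int)) (acc : List (List Int)) :
    l.foldl (fun out comb => out ++ [comb]) acc = acc ++ l := by
  induction l generalizing acc with
  | nil => simp
  | cons c l ih => simp [List.foldl, ih]

-- ===== VERDICT (by name: the statement is the Claim_ definition above) =====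
theorem generate_vars_combinations_spec : Claim_equal_generate_vars_combinations := by
  intro vars _
  unfold Spec_generate_vars_combinations generate_vars_combinations generate_vars_combinations_alt
  have hr : PySem.List.pyRange 1 4 1 = [1, 2, 3] := by decide
  rw [hr]
  simp only [List.foldl_cons, List.foldl_nil, foldl_append_singleton]
  simp only [show Int.toNat 1 = 1 from rfl, show Int.toNat 2 = 2 from rfl,
    show Int.toNat 3 = 3 from rfl]
  norm_num [pvCombA_one, pvCombA_two, pvCombA_three, List.append_assoc]
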